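-- pv_equiv track=rewrite | github.com/seovalue/Algorithm | python_code/[1차]뉴스_클러스터링.py | cut_two_letter
-- ===== SOURCE A (Python) =====
-- def cut_two_letter(s):
--     res = dict()
--     for i in range(1, len(s)):
--         if s[i - 1].isalpha() and s[i].isalpha():
--             if s[i - 1] + s[i] in res.keys():
--                 res[s[i - 1] + s[i]] += 1
--             else:
--                 res[s[i - 1] + s[i]] = 1
--     return res
-- ===== SOURCE B (Python) =====
-- def cut_two_letter(s):
--     # phase 1: split s into maximal runs of alphabetic characters
--     runs = []
--     cur = ""
--     for ch in s:
--         if ch.isalpha():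
--             cur += ch
--         else:
--             if cur:
--                 runs.append(cur)
--             cur = ""
--     if cur:
--         runs.append(cur)
--     # phase 2: count consecutive bigrams inside each run
--     res = {}
--     for run in runs:
--         for j in range(len(run) - 1):
--             key = run[j] + run[j + 1]
--             res[key] = res.get(key, 0) + 1
--     return res
-- ===== Notes on version B (the rewrite author's own statement) =====
-- stated objective: alternative
-- what changed: Replaces A's single indexed pass with a per-position both-alpha guard (testing s[i-1] and s[i] and rebuilding the key string three times per hit) by a two-phase segment-then-count scan: first split the string into maximal alphabetic runs, then count the consecutive bigrams inside each run with dict.get.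
import Mathlib
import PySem

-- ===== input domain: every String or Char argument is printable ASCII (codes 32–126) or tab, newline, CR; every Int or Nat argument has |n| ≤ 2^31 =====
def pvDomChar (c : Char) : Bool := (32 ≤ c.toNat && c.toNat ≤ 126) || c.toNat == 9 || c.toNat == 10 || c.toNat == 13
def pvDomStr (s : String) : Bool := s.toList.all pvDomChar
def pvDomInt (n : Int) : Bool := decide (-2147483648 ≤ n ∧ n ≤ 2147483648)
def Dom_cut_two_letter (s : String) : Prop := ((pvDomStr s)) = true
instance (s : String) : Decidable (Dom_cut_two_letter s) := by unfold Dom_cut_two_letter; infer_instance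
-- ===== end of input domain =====

-- B replaces A's per-position both-alpha guard by a two-phase scan (split into maximal
-- alphabetic runs, then count bigrams inside each run): a different decomposition ("alternative").

-- ===== PORT A =====
def cut_two_letter (s : String) : List (String × Int) :=
  ((PySem.List.pyRange 1 s.toList.length 1).foldl (fun res i =>
      if PySem.Chars.isalpha (PySem.List.pyGetD s.toList (i - 1) ' ') &&
         PySem.Chars.isalpha (PySem.List.pyGetD s.toList i ' ') then
        -- Python recomputes s[i-1] + s[i] for the test and both updates; inlined likewise
        if res.contains (String.mk [PySem.List.pyGetD s.toList (i - 1) ' ', PySem.List.pyGetD s.toList i ' ']) then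
          res.insert (String.mk [PySem.List.pyGetD s.toList (i - 1) ' ', PySem.List.pyGetD s.toList i ' '])
            (res.getD (String.mk [PySem.List.pyGetD s.toList (i - 1) ' ', PySem.List.pyGetD s.toList i ' ']) 0 + 1)
        else res.insert (String.mk [PySem.List.pyGetD s.toList (i - 1) ' ', PySem.List.pyGetD s.toList i ' ']) 1
      else res) PySem.Dict.empty).items

-- ===== PORT B =====
-- run-splitting pass of B (phase 1 of Source B: maximal alphabetic runs, with the pending run)
def pvRunsStep (st : List (List Char) × List Char) (ch : Char) : List (List Char) × List Char :=
  if PySem.Chars.isalpha ch then (st.1, st.2 ++ [ch])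
  else (if st.2 ≠ [] then st.1 ++ [st.2] else st.1, [])

def pvRuns (cs : List Char) : List (List Char) :=
  if (cs.foldl pvRunsStep ([], [])).2 ≠ [] then
    (cs.foldl pvRunsStep ([], [])).1 ++ [(cs.foldl pvRunsStep ([], [])).2]
  else (cs.foldl pvRunsStep ([], [])).1

def cut_two_letter_alt (s : String) : List (String × Int) :=
  -- phase 2 of Source B: count consecutive bigrams inside each run
  ((pvRuns s.toList).foldl (fun res run =>
      (PySem.List.pyRange 0 ((run.length : Int) - 1) 1).foldl (fun res j =>
        res.insert (String.mk [PySem.List.pyGetD run j ' ', PySem.List.pyGetD run (j + 1) ' '])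
          ((res.getD (String.mk [PySem.List.pyGetD run j ' ', PySem.List.pyGetD run (j + 1) ' ']) 0) + 1))
        res) PySem.Dict.empty).items

-- ===== PRECONDITION & SPEC =====
def Spec_cut_two_letter (s : String) (out : List (String × Int)) : Prop := out = cut_two_letter_alt s
instance (s : String) (out : List (String × Int)) : Decidable (Spec_cut_two_letter s out) := by unfold Spec_cut_two_letter; infer_instance

-- ===== CLAIM (what is proved, stated in full; the proofs are below) =====
def Claim_equal_cut_two_letter : Prop := ∀ (s : String), Dom_cut_two_letter s → Spec_cut_two_letter s (cut_two_letter s)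

-- ===== LEMMAS AND PROOFS =====

def pvAdjF (cs : List Char) : List (Char × Char) :=
  (cs.zip cs.tail).filter (fun p => PySem.Chars.isalpha p.1 && PySem.Chars.isalpha p.2)

def pvKeyOf (p : Char × Char) : String := String.mk [p.1, p.2]

def pvPairs (r : List Char) : List (Char × Char) := r.zip r.tail

-- close off the pending run (proof-side view of pvRuns)
def pvFinish (st : List (List Char) × List Char) : List (List Char) :=
  if st.2 ≠ [] then st.1 ++ [st.2] else st.1

lemma pvRuns_eq (cs : List Char) : pvRuns cs = pvFinish (cs.foldl pvRunsStep ([], [])) := by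
  unfold pvRuns pvFinish; rfl

-- A's index range, read through the list, is exactly the adjacent-pair list
lemma pvMapA (cs : List Char) :
    (PySem.List.pyRange 1 (cs.length : Int) 1).map
      (fun i => (PySem.List.pyGetD cs (i - 1) ' ', PySem.List.pyGetD cs i ' '))
      = cs.zip cs.tail := by
  rw [PySem.List.pyRange_one, List.map_map]
  apply List.ext_getElem
  · simp [List.length_zip]
  · intro k h1 h2
    have hk : k + 1 < cs.length := by simp at h1; omega
    simp only [List.getElem_map, List.getElem_range, Function.comp,
      List.getElem_zip, List.getElem_tail]
    rw [Prod.mk.injEq]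
    refine ⟨?_, ?_⟩
    · rw [show (1 : Int) + (k : Int) - 1 = (k : Int) by ring, PySem.List.pyGetD_natCast]
      simp [List.getD, List.getElem?_eq_getElem (by omega : k < cs.length)]
    · rw [show (1 : Int) + (k : Int) = ((k + 1 : Nat) : Int) by push_cast; ring,
        PySem.List.pyGetD_natCast]
      simp [List.getD, List.getElem?_eq_getElem hk]

-- B's inner index range, read through the run, is exactly the run's adjacent-pair list
lemma pvMapB (cs : List Char) :
    (PySem.List.pyRange 0 ((cs.length : Int) - 1) 1).map
      (fun j => (PySem.List.pyGetD cs j ' ', PySem.List.pyGetD cs (j + 1) ' '))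
      = cs.zip cs.tail := by
  rw [PySem.List.pyRange_one, List.map_map]
  apply List.ext_getElem
  · simp [List.length_zip]
  · intro k h1 h2
    have hk : k + 1 < cs.length := by simp at h1; omega
    simp only [List.getElem_map, List.getElem_range, Function.comp,
      List.getElem_zip, List.getElem_tail]
    rw [Prod.mk.injEq]
    refine ⟨?_, ?_⟩
    · rw [show (0 : Int) + (k : Int) = (k : Int) by ring, PySem.List.pyGetD_natCast]
      simp [List.getD, List.getElem?_eq_getElem (by omega : k < cs.length)]
    · rw [show (0 : Int) + (k : Int) + 1 = ((k + 1 : Nat) : Int) by push_cast; ring,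
        PySem.List.pyGetD_natCast]
      simp [List.getD, List.getElem?_eq_getElem hk]

-- A's fold over indices 1..len-1 is a fold over the adjacent-pair list
lemma pvFoldPairsA {β : Type} (cs : List Char) (g : β → Char × Char → β) (init : β) :
    (PySem.List.pyRange 1 (cs.length : Int) 1).foldl
      (fun d i => g d (PySem.List.pyGetD cs (i - 1) ' ', PySem.List.pyGetD cs i ' ')) init
      = (cs.zip cs.tail).foldl g init := by
  rw [← pvMapA cs, List.foldl_map]

-- B's inner fold over indices 0..len-2 is a fold over the run's adjacent-pair list
lemma pvFoldPairsB {β : Type} (cs : List Char) (g : β → Char × Char → β) (init : β) :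
    (PySem.List.pyRange 0 ((cs.length : Int) - 1) 1).foldl
      (fun d j => g d (PySem.List.pyGetD cs j ' ', PySem.List.pyGetD cs (j + 1) ' ')) init
      = (cs.zip cs.tail).foldl g init := by
  rw [← pvMapB cs, List.foldl_map]

-- a fold with an if-guard is a fold over the filtered list
lemma pvFoldlFilter {α β : Type} (p : α → Bool) (g : β → α → β) :
    ∀ (l : List α) (init : β),
      l.foldl (fun d x => if p x then g d x else d) init = (l.filter p).foldl g init := by
  intro l
  induction l with
  | nil => intro init; rfl
  | cons a l ih =>
    intro init
    by_cases h : p a = true <;> simp [h, ih]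

-- A's conditional update is the counter update
lemma pvBodyA (d : PySem.Dict String Int) (key : String) :
    (if d.contains key then d.insert key (d.getD key 0 + 1) else d.insert key 1)
      = d.insert key (d.getD key 0 + 1) := by
  cases hc : d.contains key
  · simp [PySem.Dict.getD_of_not_contains _ _ hc]
  · simp

-- A computes the counter of the filtered adjacent bigrams
lemma pvA_eq (s : String) :
    cut_two_letter s = (PySem.Dict.counter ((pvAdjF s.toList).map pvKeyOf)).items := by
  unfold cut_two_letter
  rw [show (PySem.List.pyRange 1 (s.toList.length : Int) 1).foldl
        (fun res i =>
          if PySem.Chars.isalpha (PySem.List.pyGetD s.toList (i - 1) ' ') &&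
             PySem.Chars.isalpha (PySem.List.pyGetD s.toList i ' ') then
            if res.contains (String.mk [PySem.List.pyGetD s.toList (i - 1) ' ', PySem.List.pyGetD s.toList i ' ']) then
              res.insert (String.mk [PySem.List.pyGetD s.toList (i - 1) ' ', PySem.List.pyGetD s.toList i ' '])
                (res.getD (String.mk [PySem.List.pyGetD s.toList (i - 1) ' ', PySem.List.pyGetD s.toList i ' ']) 0 + 1)
            else res.insert (String.mk [PySem.List.pyGetD s.toList (i - 1) ' ', PySem.List.pyGetD s.toList i ' ']) 1
          else res) (PySem.Dict.empty : PySem.Dict String Int)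
      = (s.toList.zip s.toList.tail).foldl
          (fun res p =>
            if PySem.Chars.isalpha p.1 && PySem.Chars.isalpha p.2 then
              if res.contains (pvKeyOf p) then res.insert (pvKeyOf p) (res.getD (pvKeyOf p) 0 + 1)
              else res.insert (pvKeyOf p) 1
            else res) (PySem.Dict.empty : PySem.Dict String Int) from
      pvFoldPairsA s.toList (fun res p =>
        if PySem.Chars.isalpha p.1 && PySem.Chars.isalpha p.2 then
          if res.contains (pvKeyOf p) then res.insert (pvKeyOf p) (res.getD (pvKeyOf p) 0 + 1)
          else res.insert (pvKeyOf p) 1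
        else res) (PySem.Dict.empty : PySem.Dict String Int)]
  rw [pvFoldlFilter (fun p => PySem.Chars.isalpha p.1 && PySem.Chars.isalpha p.2)
        (fun res p =>
          if res.contains (pvKeyOf p) then res.insert (pvKeyOf p) (res.getD (pvKeyOf p) 0 + 1)
          else res.insert (pvKeyOf p) 1)
        (s.toList.zip s.toList.tail) (PySem.Dict.empty : PySem.Dict String Int)]
  have hstep : ((s.toList.zip s.toList.tail).filter
        (fun p => PySem.Chars.isalpha p.1 && PySem.Chars.isalpha p.2)).foldl
      (fun res p =>
        if res.contains (pvKeyOf p) then res.insert (pvKeyOf p) (res.getD (pvKeyOf p) 0 + 1)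
        else res.insert (pvKeyOf p) 1) (PySem.Dict.empty : PySem.Dict String Int)
      = ((pvAdjF s.toList).map pvKeyOf).foldl
          (fun res k => res.insert k (res.getD k 0 + 1)) (PySem.Dict.empty : PySem.Dict String Int) := by
    rw [List.foldl_map]
    apply List.foldl_ext
    intro d p _; exact pvBodyA d (pvKeyOf p)
  rw [hstep, PySem.Dict.foldl_insert_getD_add_one_eq_counter]

lemma pvAdjF_cons_cons (a b : Char) (xs : List Char) :
    pvAdjF (a :: b :: xs)
      = (if PySem.Chars.isalpha a && PySem.Chars.isalpha b then [(a, b)] else []) ++ pvAdjF (b :: xs) := by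
  simp [pvAdjF, List.filter_cons]
  split <;> simp

lemma pvAdjF_drop_head (a : Char) (xs : List Char) (h : PySem.Chars.isalpha a = false) :
    pvAdjF (a :: xs) = pvAdjF xs := by
  cases xs with
  | nil => rfl
  | cons b xs => rw [pvAdjF_cons_cons]; simp [h]

lemma pvAdjF_all_alpha (c : List Char) (h : ∀ x ∈ c, PySem.Chars.isalpha x = true) :
    pvAdjF c = pvPairs c := by
  unfold pvAdjF pvPairs
  apply List.filter_eq_self.mpr
  intro p hp
  obtain ⟨h1, h2⟩ := List.of_mem_zip hp
  simp [h p.1 h1, h p.2 (List.mem_of_mem_tail h2)]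

lemma pvAdjF_run_prefix (c : List Char) (ch : Char) (xs : List Char)
    (hc : ∀ x ∈ c, PySem.Chars.isalpha x = true) (hch : PySem.Chars.isalpha ch = false) :
    pvAdjF (c ++ ch :: xs) = pvPairs c ++ pvAdjF xs := by
  induction c with
  | nil => simp [pvPairs, pvAdjF_drop_head ch xs hch]
  | cons a c ih =>
    have ha := hc a (by simp)
    have hc' : ∀ x ∈ c, PySem.Chars.isalpha x = true := fun x hx => hc x (by simp [hx])
    cases c with
    | nil =>
      simp only [List.nil_append, List.cons_append, pvAdjF_cons_cons, pvPairs]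
      simp [hch, pvAdjF_drop_head ch xs hch]
    | cons b c' =>
      have hb := hc' b (by simp)
      simp only [List.cons_append, pvAdjF_cons_cons]
      rw [← List.cons_append, ih hc']
      simp [pvPairs, ha, hb]

-- the runs produced by B carve the filtered adjacent pairs of the whole string
lemma pvMain : ∀ (cs : List Char) (R : List (List Char)) (c : List Char),
    (∀ x ∈ c, PySem.Chars.isalpha x = true) →
    (pvFinish (cs.foldl pvRunsStep (R, c))).flatMap pvPairs
      = R.flatMap pvPairs ++ pvAdjF (c ++ cs) := by
  intro cs
  induction cs with
  | nil =>
    intro R c hc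
    simp only [List.foldl_nil, pvFinish, List.append_nil]
    rw [pvAdjF_all_alpha c hc]
    by_cases h : c = []
    · simp [h, pvPairs]
    · simp [h]
  | cons ch cs ih =>
    intro R c hc
    simp only [List.foldl_cons]
    by_cases h : PySem.Chars.isalpha ch = true
    · rw [show pvRunsStep (R, c) ch = (R, c ++ [ch]) by simp [pvRunsStep, h]]
      have hcc : ∀ x ∈ c ++ [ch], PySem.Chars.isalpha x = true := by
        intro x hx
        rcases List.mem_append.mp hx with h1 | h1
        · exact hc x h1
        · simp at h1; subst h1; exact h
      rw [ih R (c ++ [ch]) hcc]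
      simp
    · have h' : PySem.Chars.isalpha ch = false := by
        cases hx : PySem.Chars.isalpha ch
        · rfl
        · exact absurd hx h
      rw [show pvRunsStep (R, c) ch = (if c ≠ [] then R ++ [c] else R, []) by simp [pvRunsStep, h']]
      rw [ih _ [] (by intro x hx; simp at hx)]
      rw [pvAdjF_run_prefix c ch cs hc h']
      by_cases hce : c = []
      · simp [hce, pvPairs]
      · simp [hce]

-- folding an inner fold over each run is folding over the flattened key list
lemma pvFoldlFlat {α β : Type} (F : α → List String) (g : β → String → β) :
    ∀ (runs : List α) (init : β),
      runs.foldl (fun d r => (F r).foldl g d) init = (runs.flatMap F).foldl g init := by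
  intro runs
  induction runs with
  | nil => intro init; rfl
  | cons r rs ih => intro init; simp [List.flatMap_cons, List.foldl_append, ih]

-- B computes the counter of the bigrams of its runs
lemma pvB_eq (s : String) :
    cut_two_letter_alt s
      = (PySem.Dict.counter (((pvRuns s.toList).flatMap pvPairs).map pvKeyOf)).items := by
  unfold cut_two_letter_alt
  have hinner : ∀ (run : List Char) (d : PySem.Dict String Int),
      (PySem.List.pyRange 0 ((run.length : Int) - 1) 1).foldl (fun res j =>
        res.insert (String.mk [PySem.List.pyGetD run j ' ', PySem.List.pyGetD run (j + 1) ' '])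
          ((res.getD (String.mk [PySem.List.pyGetD run j ' ', PySem.List.pyGetD run (j + 1) ' ']) 0) + 1)) d
      = ((pvPairs run).map pvKeyOf).foldl (fun res k => res.insert k (res.getD k 0 + 1)) d := by
    intro run d
    rw [show (PySem.List.pyRange 0 ((run.length : Int) - 1) 1).foldl (fun res j =>
          res.insert (String.mk [PySem.List.pyGetD run j ' ', PySem.List.pyGetD run (j + 1) ' '])
            ((res.getD (String.mk [PySem.List.pyGetD run j ' ', PySem.List.pyGetD run (j + 1) ' ']) 0) + 1)) d
        = (run.zip run.tail).foldl
            (fun res p => res.insert (pvKeyOf p) (res.getD (pvKeyOf p) 0 + 1)) d from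
        pvFoldPairsB run (fun res p => res.insert (pvKeyOf p) (res.getD (pvKeyOf p) 0 + 1)) d]
    rw [List.foldl_map]
    rfl
  rw [show (pvRuns s.toList).foldl (fun res run =>
        (PySem.List.pyRange 0 ((run.length : Int) - 1) 1).foldl (fun res j =>
          res.insert (String.mk [PySem.List.pyGetD run j ' ', PySem.List.pyGetD run (j + 1) ' '])
            ((res.getD (String.mk [PySem.List.pyGetD run j ' ', PySem.List.pyGetD run (j + 1) ' ']) 0) + 1))
          res) (PySem.Dict.empty : PySem.Dict String Int)
      = (pvRuns s.toList).foldl (fun d run =>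
          ((pvPairs run).map pvKeyOf).foldl (fun res k => res.insert k (res.getD k 0 + 1)) d)
          (PySem.Dict.empty : PySem.Dict String Int) from
        List.foldl_ext _ _ _ (fun d run _ => hinner run d)]
  rw [pvFoldlFlat (fun run => (pvPairs run).map pvKeyOf)]
  rw [← List.map_flatMap]
  rw [PySem.Dict.foldl_insert_getD_add_one_eq_counter]

-- ===== VERDICT (by name: the statement is the Claim_ definition above) =====
theorem cut_two_letter_spec : Claim_equal_cut_two_letter := by
  intro s _
  unfold Spec_cut_two_letter
  rw [pvA_eq, pvB_eq, pvRuns_eq, pvMain s.toList [] [] (by intro x hx; simp at hx)]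
  simp
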